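-- pv_equiv track=rewrite | github.com/daniel-reich/ubiquitous-fiesta | hv572GaPtbqwhJpTb_13.py | elasticize
-- ===== SOURCE A (Python) =====
-- def elasticize(word):
--   if len(word)<3: return word
--   m = int(len(word)/2)
--   w = ''
--   if len(word)%2:
--     for x in range(m+1):  w+=word[x]*(x+1)
--     for i in range(m-1,-1,-1): w+=word[::-1][i]*(i+1)
--   else:
--     for x in range(m):  w+=word[x]*(x+1)
--     for i in range(m-1,-1,-1): w+=word[::-1][i]*(i+1)
--   return w
-- ===== SOURCE B (Python) =====
-- def elasticize(word):
--   return ''.join(c * min(i + 1, len(word) - i) for i, c in enumerate(word))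
-- ===== Notes on version B (the rewrite author's own statement) =====
-- stated objective: simpler
-- what changed: Replaces A's parity split, string reversal and two directional loops with one pass computing each character's repetition count by the closed form min(i+1, n-i); the len<3 guard is dropped since the formula already returns short words unchanged.
import Mathlib
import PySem

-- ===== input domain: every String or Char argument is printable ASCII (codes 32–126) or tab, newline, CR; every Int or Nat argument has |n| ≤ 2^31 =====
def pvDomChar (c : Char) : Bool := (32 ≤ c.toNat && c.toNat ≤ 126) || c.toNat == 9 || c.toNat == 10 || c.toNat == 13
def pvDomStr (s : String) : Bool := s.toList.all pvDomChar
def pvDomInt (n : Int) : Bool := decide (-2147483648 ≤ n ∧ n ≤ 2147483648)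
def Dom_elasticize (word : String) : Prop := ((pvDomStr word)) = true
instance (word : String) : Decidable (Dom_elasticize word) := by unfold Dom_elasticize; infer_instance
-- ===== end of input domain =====

-- B replaces A's parity split, reversal and two directional loops by one pass with the
-- closed-form count min(i+1, n-i) per character (objective: simpler).

-- ===== PORT A =====
-- literal port of A; strings handled as List Char, rebuilt with String.mk at the end.
-- int(len(word)/2) = floor division since the length is nonnegative → PySem.Int.floordiv;
-- word[::-1] is the reverse (PySem.List.slice?_none_none_neg_one); word[x] / word[::-1][i]
-- are always in range in these loops, so pyGetD with a dummy default is exact.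
def elasticize (word : String) : String :=
  let l := word.toList
  if (l.length : Int) < 3 then word else
  let m : Int := PySem.Int.floordiv (l.length : Int) 2
  let w : List Char := []
  let w :=
    if PySem.Int.mod (l.length : Int) 2 ≠ 0 then
      let w := (PySem.List.pyRange 0 (m + 1) 1).foldl
        (fun acc x => acc ++ List.replicate (x + 1).toNat (PySem.List.pyGetD l x ' ')) w
      (PySem.List.pyRange (m - 1) (-1) (-1)).foldl
        (fun acc i => acc ++ List.replicate (i + 1).toNat (PySem.List.pyGetD l.reverse i ' ')) w
    else
      let w := (PySem.List.pyRange 0 m 1).foldl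
        (fun acc x => acc ++ List.replicate (x + 1).toNat (PySem.List.pyGetD l x ' ')) w
      (PySem.List.pyRange (m - 1) (-1) (-1)).foldl
        (fun acc i => acc ++ List.replicate (i + 1).toNat (PySem.List.pyGetD l.reverse i ' ')) w
  String.ofList w

-- ===== PORT B =====
-- literal port of Source B: ''.join(c * min(i+1, len(word)-i) for i, c in enumerate(word))
def elasticize_alt (word : String) : String :=
  let l := word.toList
  String.ofList (((PySem.List.enumerate l 0).map
    (fun p => List.replicate (min (p.1 + 1) ((l.length : Int) - p.1)).toNat p.2)).flatten)

-- ===== PRECONDITION & SPEC =====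
def Spec_elasticize (word : String) (out : String) : Prop := out = elasticize_alt word
instance (word : String) (out : String) : Decidable (Spec_elasticize word out) := by unfold Spec_elasticize; infer_instance

-- ===== CLAIM (what is proved, stated in full; the proofs are below) =====
def Claim_equal_elasticize : Prop := ∀ (word : String), Dom_elasticize word → Spec_elasticize word (elasticize word)

-- ===== LEMMAS AND PROOFS =====

theorem pv_foldl_app (g : Int → List Char) :
    ∀ (xs : List Int) (init : List Char),
      xs.foldl (fun acc x => acc ++ g x) init = init ++ (xs.map g).flatten := by
  intro xs
  induction xs with
  | nil => simp
  | cons a t ih => intro init; simp [List.foldl_cons, ih]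

-- B's generator over enumerate, rewritten as a map over range(len(l))
theorem pv_B_eq (l : List Char) :
    ((PySem.List.enumerate l 0).map
      (fun p => List.replicate (min (p.1 + 1) ((l.length : Int) - p.1)).toNat p.2)).flatten
    = ((PySem.List.pyRange 0 (l.length : Int) 1).map
        (fun j => List.replicate (min (j + 1) ((l.length : Int) - j)).toNat
          (PySem.List.pyGetD l j ' '))).flatten := by
  rw [PySem.List.enumerate_eq_map_pyRange (d := ' '), List.map_map]
  rfl

-- short words come back unchanged from B's formula
theorem pv_short (l : List Char) (h : l.length < 3) :
    ((PySem.List.enumerate l 0).map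
      (fun p => List.replicate (min (p.1 + 1) ((l.length : Int) - p.1)).toNat p.2)).flatten = l := by
  match l, h with
  | [], _ => simp [PySem.List.enumerate]
  | [a], _ => simp [PySem.List.enumerate]
  | [a, b], _ => simp [PySem.List.enumerate]

-- on the first half the min is i+1
theorem pv_first (l : List Char) (t : Int) (h : t + t ≤ (l.length : Int) + 1) :
    (PySem.List.pyRange 0 t 1).map
      (fun x => List.replicate (x + 1).toNat (PySem.List.pyGetD l x ' '))
    = (PySem.List.pyRange 0 t 1).map
      (fun j => List.replicate (min (j + 1) ((l.length : Int) - j)).toNat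
        (PySem.List.pyGetD l j ' ')) := by
  apply List.map_congr_left
  intro j hj
  rw [PySem.List.mem_pyRange_one] at hj
  have : min (j + 1) ((l.length : Int) - j) = j + 1 := by omega
  rw [this]

-- the countdown loop over the reversed word is the second half of B's pass
theorem pv_second (l : List Char) (m : Int) (h0 : 0 ≤ m) (h2 : m + m ≤ (l.length : Int)) :
    (PySem.List.pyRange (m - 1) (-1) (-1)).map
      (fun i => List.replicate (i + 1).toNat (PySem.List.pyGetD l.reverse i ' '))
    = (PySem.List.pyRange ((l.length : Int) - m) (l.length : Int) 1).map
      (fun j => List.replicate (min (j + 1) ((l.length : Int) - j)).toNat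
        (PySem.List.pyGetD l j ' ')) := by
  rw [PySem.List.pyRange_neg_one, PySem.List.pyRange_one]
  have hlen : ((l.length : Int) - ((l.length : Int) - m)).toNat = (m - 1 - -1).toNat := by omega
  rw [hlen, List.map_map, List.map_map]
  apply List.map_congr_left
  intro k hk
  rw [List.mem_range] at hk
  have hk' : (k : Int) < m := by omega
  simp only [Function.comp]
  have hcnt : (m - 1 - (k : Int) + 1).toNat
      = (min ((l.length : Int) - m + (k : Int) + 1)
          ((l.length : Int) - ((l.length : Int) - m + (k : Int)))).toNat := by omega
  have hchar : PySem.List.pyGetD l.reverse (m - 1 - (k : Int)) ' '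
      = PySem.List.pyGetD l ((l.length : Int) - m + (k : Int)) ' ' := by
    rw [PySem.List.pyGetD_eq_getElem l.reverse ' ' (by omega) (by simp; omega),
        PySem.List.pyGetD_eq_getElem l ' ' (by omega) (by omega)]
    rw [List.getElem_reverse]
    congr 1
    omega
  rw [hcnt, hchar]

-- A on a word of length ≥ 3 equals B's single pass
theorem pv_main (word : String) : elasticize word = elasticize_alt word := by
  unfold elasticize elasticize_alt
  set l := word.toList with hl
  by_cases h3 : (l.length : Int) < 3
  · simp only [h3, if_pos]
    rw [pv_short l (by omega), hl, String.ofList_toList]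
  · simp only [h3, if_neg, not_false_iff]
    rw [pv_B_eq]
    set n : Int := (l.length : Int) with hn
    have hn0 : 0 ≤ n := by positivity
    set m : Int := PySem.Int.floordiv n 2 with hm
    have hdm : m = n / 2 := by
      simp [hm, PySem.Int.floordiv, Int.fdiv_eq_ediv]
    have hmod : PySem.Int.mod n 2 = n % 2 := by
      simp [PySem.Int.mod, Int.fmod_eq_emod]
    by_cases hpar : PySem.Int.mod n 2 ≠ 0
    · -- odd length: n = 2m + 1
      have hodd : m + m + 1 = n := by
        have h := hpar; rw [hmod] at h; omega
      rw [if_pos hpar]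
      rw [pv_foldl_app, pv_foldl_app, List.nil_append]
      rw [pv_first l (m + 1) (by omega), pv_second l m (by omega) (by omega)]
      have hsplit : PySem.List.pyRange 0 n 1
          = PySem.List.pyRange 0 (m + 1) 1 ++ PySem.List.pyRange (m + 1) n 1 :=
        PySem.List.pyRange_one_append 0 (m + 1) n (by omega) (by omega)
      have hs : n - m = m + 1 := by omega
      rw [hs, hsplit, List.map_append, List.flatten_append]
    · -- even length: n = 2m
      have heven : m + m = n := by
        have h := hpar; rw [hmod] at h; omega
      rw [if_neg hpar]
      rw [pv_foldl_app, pv_foldl_app, List.nil_append]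
      rw [pv_first l m (by omega), pv_second l m (by omega) (by omega)]
      have hsplit : PySem.List.pyRange 0 n 1
          = PySem.List.pyRange 0 m 1 ++ PySem.List.pyRange m n 1 :=
        PySem.List.pyRange_one_append 0 m n (by omega) (by omega)
      have hs : n - m = m := by omega
      rw [hs, hsplit, List.map_append, List.flatten_append]

-- ===== VERDICT (by name: the statement is the Claim_ definition above) =====
theorem elasticize_spec : Claim_equal_elasticize := by
  intro word _
  exact pv_main word
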